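-- pv_equiv track=rewrite | github.com/dafishcode/empirical_dynamic_modelling | admin_functions.py | comb_list
-- ===== SOURCE A (Python) =====
-- def comb_list(inp_list):
-- #=======================================================================================
--
--     """
--     This function takes a series of lists and combines them into one list.
--
--     Inputs:
--         inp_list (list): input list
--
--     Returns:
--         out_list (list): output list
--
--     """
--
--     #Find total length
--     sumd=0
--     for i in range(len(inp_list)):
--         for e in inp_list[i]:
--             sumd+=1
--
--
--     out_list = list(range(sumd))
--     count=0
--     for i in range(len(inp_list)):
--         for e in inp_list[i]:
--             out_list[count] = e
--             count+=1
--
--     return(out_list)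
-- ===== SOURCE B (Python) =====
-- def comb_list(inp_list):
--     """Combine a series of lists into one list (single growth pass, no pre-count)."""
--     out_list = []
--     for sub in inp_list:
--         for e in sub:
--             out_list.append(e)
--     return out_list
-- ===== Notes on version B (the rewrite author's own statement) =====
-- stated objective: simpler
-- what changed: B drops A's counting pre-pass and index-preallocated buffer entirely, building the result in a single append-based growth pass over the sublists.
import Mathlib
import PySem

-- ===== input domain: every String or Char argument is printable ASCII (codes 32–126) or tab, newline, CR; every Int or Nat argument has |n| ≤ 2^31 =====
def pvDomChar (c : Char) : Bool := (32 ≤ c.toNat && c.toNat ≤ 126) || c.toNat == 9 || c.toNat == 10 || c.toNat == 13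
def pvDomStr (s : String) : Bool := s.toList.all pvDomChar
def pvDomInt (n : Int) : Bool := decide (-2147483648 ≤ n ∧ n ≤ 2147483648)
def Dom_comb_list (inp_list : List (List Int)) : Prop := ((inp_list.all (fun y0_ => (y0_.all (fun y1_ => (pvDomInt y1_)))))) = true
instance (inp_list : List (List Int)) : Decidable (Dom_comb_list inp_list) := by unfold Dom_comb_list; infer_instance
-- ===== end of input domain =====

-- B replaces A's two passes (count total, preallocate, overwrite by index) with one append-based growth pass; return value only, no mutation of the argument.

-- ===== PORT A =====
-- literal port of A: first index loop counts the elements, then a list(range(sumd))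
-- buffer is overwritten slot by slot while 'count' advances (count is provably in
-- range throughout, so .toNat on it is exact here)
def comb_list (inp_list : List (List Int)) : List Int :=
  let sumd : Int :=
    (PySem.List.pyRange 0 (inp_list.length : Int) 1).foldl
      (fun s i => (PySem.List.pyGetD inp_list i []).foldl (fun s _ => s + 1) s) 0
  let out0 : List Int := PySem.List.pyRange 0 sumd 1
  let res :=
    (PySem.List.pyRange 0 (inp_list.length : Int) 1).foldl
      (fun (st : List Int × Int) i =>
        (PySem.List.pyGetD inp_list i []).foldl
          (fun (st : List Int × Int) e => (st.1.set st.2.toNat e, st.2 + 1)) st)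
      (out0, 0)
  res.1

-- ===== PORT B =====
def comb_list_alt (inp_list : List (List Int)) : List Int :=
  inp_list.foldl (fun out sub => sub.foldl (fun o e => o ++ [e]) out) []

-- ===== PRECONDITION & SPEC =====
def Spec_comb_list (inp_list : List (List Int)) (out : List Int) : Prop := out = comb_list_alt inp_list
instance (inp_list : List (List Int)) (out : List Int) : Decidable (Spec_comb_list inp_list out) := by unfold Spec_comb_list; infer_instance

-- ===== CLAIM (what is proved, stated in full; the proofs are below) =====
def Claim_equal_comb_list : Prop := ∀ (inp_list : List (List Int)), Dom_comb_list inp_list → Spec_comb_list inp_list (comb_list inp_list)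

-- ===== LEMMAS AND PROOFS =====

-- B equals flatten
theorem foldl_app (l : List (List Int)) (acc : List Int) :
    l.foldl (fun out sub => out ++ sub) acc = acc ++ l.flatten := by
  induction l generalizing acc with
  | nil => simp
  | cons sub t ih => simp [ih, List.append_assoc]

theorem alt_eq_flatten (inp_list : List (List Int)) :
    comb_list_alt inp_list = inp_list.flatten := by
  rw [comb_list_alt]
  simp only [PySem.List.foldl_append_singleton]
  rw [foldl_app, List.nil_append]

theorem count_inner (xs : List Int) (s : Int) :
    xs.foldl (fun s _ => s + 1) s = s + xs.length := by
  induction xs generalizing s with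
  | nil => simp
  | cons x xs ih => simp [ih]; omega

-- counting pass of A
theorem count_aux (l : List (List Int)) (s0 : Int) :
    l.foldl (fun s sub => sub.foldl (fun s _ => s + 1) s) s0 = s0 + l.flatten.length := by
  induction l generalizing s0 with
  | nil => simp
  | cons sub t ih =>
      simp only [List.foldl_cons]
      rw [count_inner, ih]
      simp [List.flatten_cons]
      ring

-- one inner fill loop of A
theorem fill_one (sub : List Int) :
    ∀ (pre buf : List Int), sub.length ≤ buf.length →
    sub.foldl (fun (st : List Int × Int) e => (st.1.set st.2.toNat e, st.2 + 1))
      (pre ++ buf, (pre.length : Int))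
    = (pre ++ sub ++ buf.drop sub.length, (pre.length : Int) + sub.length) := by
  induction sub with
  | nil => intro pre buf _; simp
  | cons e rest ih =>
      intro pre buf hlen
      cases buf with
      | nil => simp at hlen
      | cons b bs =>
          have hset : (pre ++ b :: bs).set ((pre.length : Int)).toNat e
              = (pre ++ [e]) ++ bs := by
            simp [List.append_assoc]
          rw [List.foldl_cons]
          simp only [hset]
          have h1 : ((pre.length : Int) + 1) = (((pre ++ [e]).length : Nat) : Int) := by
            simp
          rw [h1, ih (pre ++ [e]) bs (by simp at hlen; omega)]
          simp [List.append_assoc]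
          ring

-- whole fill pass of A over the list of sublists
theorem fill_all (l : List (List Int)) :
    ∀ (pre buf : List Int), l.flatten.length ≤ buf.length →
    l.foldl (fun (st : List Int × Int) sub =>
        sub.foldl (fun (st : List Int × Int) e => (st.1.set st.2.toNat e, st.2 + 1)) st)
      (pre ++ buf, (pre.length : Int))
    = (pre ++ l.flatten ++ buf.drop l.flatten.length,
       (pre.length : Int) + l.flatten.length) := by
  induction l with
  | nil => intro pre buf _; simp
  | cons sub t ih =>
      intro pre buf hlen
      have hsub : sub.length ≤ buf.length := by
        simp [List.flatten_cons] at hlen; omega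
      rw [List.foldl_cons, fill_one sub pre buf hsub]
      have h1 : ((pre.length : Int) + sub.length) = (((pre ++ sub).length : Nat) : Int) := by
        simp
      rw [h1, ih (pre ++ sub) (buf.drop sub.length)
        (by simp [List.flatten_cons] at hlen ⊢; omega)]
      simp [List.flatten_cons, List.append_assoc, List.drop_drop]
      ring

-- ===== VERDICT (by name: the statement is the Claim_ definition above) =====
theorem comb_list_spec : Claim_equal_comb_list := by
  intro inp_list _
  unfold Spec_comb_list
  rw [alt_eq_flatten]
  simp only [comb_list]
  rw [PySem.List.foldl_pyRange_zero_pyGetD' inp_list ([] : List Int)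
        (fun s sub => sub.foldl (fun s _ => s + 1) s) (0 : Int),
      count_aux inp_list 0, zero_add]
  rw [PySem.List.foldl_pyRange_zero_pyGetD' inp_list ([] : List Int)]
  have hblen : (PySem.List.pyRange 0 (inp_list.flatten.length : Int) 1).length
      = inp_list.flatten.length := by
    rw [PySem.List.length_pyRange_one]; omega
  have h := fill_all inp_list [] (PySem.List.pyRange 0 (inp_list.flatten.length : Int) 1)
      hblen.ge
  simp only [List.nil_append, List.length_nil, Nat.cast_zero] at h
  rw [h, List.drop_eq_nil_of_le hblen.le, List.append_nil]
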